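-- pv_equiv track=rewrite | github.com/57BBBears/tasks | gossiping_bus_drivers.py | _get_stops_with_gossips
-- ===== SOURCE A (Python) =====
-- def _get_stops_with_gossips(
--     bus_stops: list[str], bus_drivers: list[set]
-- ) -> dict[str, set]:
--     stops_with_gossips = {}
--
--     for stop_i in range(len(bus_stops)):
--         if (bus_stop_name := bus_stops[stop_i]) not in stops_with_gossips:
--             stops_with_gossips[bus_stop_name] = set()
--         # union previous and current gossips
--         stops_with_gossips[bus_stop_name] |= bus_drivers[stop_i]
--
--     return stops_with_gossips
-- ===== SOURCE B (Python) =====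
-- def _get_stops_with_gossips(bus_stops, bus_drivers):
--     # Two passes: group the gossip sets by stop name, then union each group at once.
--     groups = {}
--     for name, gossips in zip(bus_stops, bus_drivers):
--         groups.setdefault(name, []).append(gossips)
--     return {name: set().union(*sets) for name, sets in groups.items()}
-- ===== Notes on version B (the rewrite author's own statement) =====
-- stated objective: alternative
-- what changed: B replaces A's single index loop with incremental dict-of-set unions by two separately-shaped passes: a zip pass grouping each stop's gossip sets into lists, then a dict comprehension that unions each group in one set().union(*sets) call.
import Mathlib
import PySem

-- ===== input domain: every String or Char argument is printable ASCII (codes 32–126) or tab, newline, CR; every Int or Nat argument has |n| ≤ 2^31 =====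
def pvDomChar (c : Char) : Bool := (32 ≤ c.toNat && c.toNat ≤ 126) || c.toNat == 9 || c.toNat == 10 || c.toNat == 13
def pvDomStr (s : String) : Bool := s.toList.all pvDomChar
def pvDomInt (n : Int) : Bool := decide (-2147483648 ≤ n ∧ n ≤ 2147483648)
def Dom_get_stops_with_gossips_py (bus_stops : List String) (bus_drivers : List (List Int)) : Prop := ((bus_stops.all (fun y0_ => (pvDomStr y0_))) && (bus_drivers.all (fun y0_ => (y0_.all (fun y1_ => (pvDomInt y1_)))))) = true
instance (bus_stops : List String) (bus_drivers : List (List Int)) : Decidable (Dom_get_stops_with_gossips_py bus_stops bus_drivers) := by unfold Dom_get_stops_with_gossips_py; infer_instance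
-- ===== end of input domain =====

-- B separates A's incremental index-loop of dict-set unions into two passes (group by name, then union each group); same cost, different decomposition. Equivalence is about the return value.


-- ===== PORT A =====
def get_stops_with_gossips_py (bus_stops : List String) (bus_drivers : List (List Int)) : List (String × List Int) :=
  ((PySem.List.pyRange 0 (bus_stops.length : Int) 1).foldl (fun d i =>
      let name := PySem.List.pyGetD bus_stops i ""
      let d1 := if d.contains name then d else d.insert name PySem.Set.empty
      d1.insert name (PySem.Set.union (d1.getD name PySem.Set.empty) (PySem.List.pyGetD bus_drivers i []))
    ) PySem.Dict.empty).items

-- ===== PORT B =====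
def get_stops_with_gossips_py_alt (bus_stops : List String) (bus_drivers : List (List Int)) : List (String × List Int) :=
  let groups := (bus_stops.zip bus_drivers).foldl
    (fun d p => d.modify p.1 [] (fun ls => ls ++ [p.2])) PySem.Dict.empty
  groups.items.map (fun p => (p.1, p.2.foldl (fun s g => PySem.Set.union s g) PySem.Set.empty))

-- ===== PRECONDITION & SPEC =====
-- Pre_ excludes exactly the inputs where A raises IndexError: bus_stops longer than bus_drivers.
def Pre_get_stops_with_gossips_py (bus_stops : List String) (bus_drivers : List (List Int)) : Prop :=
  bus_stops.length ≤ bus_drivers.length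
instance (bus_stops : List String) (bus_drivers : List (List Int)) : Decidable (Pre_get_stops_with_gossips_py bus_stops bus_drivers) := by unfold Pre_get_stops_with_gossips_py; infer_instance
def pvWitness_get_stops_with_gossips_py : List String × List (List Int) := (["a", "b", "a"], [[1], [2], [3]])

def Spec_get_stops_with_gossips_py (bus_stops : List String) (bus_drivers : List (List Int)) (out : List (String × List Int)) : Prop := out = get_stops_with_gossips_py_alt bus_stops bus_drivers
instance (bus_stops : List String) (bus_drivers : List (List Int)) (out : List (String × List Int)) : Decidable (Spec_get_stops_with_gossips_py bus_stops bus_drivers out) := by unfold Spec_get_stops_with_gossips_py; infer_instance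

-- ===== CLAIM (what is proved, stated in full; the proofs are below) =====
def Claim_equal_get_stops_with_gossips_py : Prop := ∀ (bus_stops : List String) (bus_drivers : List (List Int)), Dom_get_stops_with_gossips_py bus_stops bus_drivers → Pre_get_stops_with_gossips_py bus_stops bus_drivers → Spec_get_stops_with_gossips_py bus_stops bus_drivers (get_stops_with_gossips_py bus_stops bus_drivers)

-- ===== LEMMAS AND PROOFS =====

-- the value map B applies to each group: union of the group's sets, left to right
def pvUnionAll (ls : List (List Int)) : List Int :=
  ls.foldl (fun s g => PySem.Set.union s g) PySem.Set.empty

-- A's index loop over range(len(bus_stops)) is the fold over the zipped prefix (lengths permitting)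
theorem foldl_range_zip {γ : Type} (g : γ → String → List Int → γ) :
    ∀ (xs : List String) (ys : List (List Int)) (d : γ), xs.length ≤ ys.length →
      (List.range xs.length).foldl (fun d k => g d (xs.getD k "") (ys.getD k [])) d
        = (xs.zip ys).foldl (fun d p => g d p.1 p.2) d := by
  intro xs
  induction xs with
  | nil => intro ys d _; simp
  | cons x xs ih =>
    intro ys d hlen
    cases ys with
    | nil => simp at hlen
    | cons y ys =>
      simp only [List.length_cons, List.range_succ_eq_map, List.foldl_cons, List.foldl_map,
        List.getD_cons_zero, List.getD_cons_succ, List.zip_cons_cons]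
      exact ih ys _ (by simpa using hlen)

-- A's loop body collapses to a single insert (the not-in branch just seeds the empty set)
theorem stepA_eq (d : PySem.Dict String (List Int)) (k : String) (g : List Int) :
    (let d1 := if d.contains k then d else d.insert k PySem.Set.empty
     d1.insert k (PySem.Set.union (d1.getD k PySem.Set.empty) g))
      = d.insert k (PySem.Set.union (d.getD k PySem.Set.empty) g) := by
  by_cases h : d.contains k
  · simp [h]
  · rw [if_neg h]
    show (d.insert k PySem.Set.empty).insert k
        (PySem.Set.union ((d.insert k PySem.Set.empty).getD k PySem.Set.empty) g) = _
    rw [PySem.Dict.getD_insert_self, PySem.Dict.insert_insert_self,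
      PySem.Dict.getD_of_not_contains d _ (eq_false_of_ne_true h)]

theorem get?_map_pvUnionAll (l : List (String × List (List Int))) (k : String) :
    (PySem.Dict.mk (l.map (fun p => (p.1, pvUnionAll p.2))) : PySem.Dict String (List Int)).get? k
      = ((PySem.Dict.mk l).get? k).map pvUnionAll := by
  induction l with
  | nil => rfl
  | cons p l ih =>
    rw [List.map_cons]
    rw [PySem.Dict.get?_mk_cons, PySem.Dict.get?_mk_cons]
    by_cases h : p.1 == k
    · simp [h]
    · simp [h, ih]

theorem contains_map_pvUnionAll (l : List (String × List (List Int))) (k : String) :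
    (PySem.Dict.mk (l.map (fun p => (p.1, pvUnionAll p.2))) : PySem.Dict String (List Int)).contains k
      = (PySem.Dict.mk l).contains k := by
  simp [PySem.Dict.contains, List.any_map, Function.comp_def]

-- one step of A on the mapped dict = the map of one grouping step of B
theorem step_commute (dg : PySem.Dict String (List (List Int))) (k : String) (g : List Int) :
    (PySem.Dict.mk (dg.items.map (fun p => (p.1, pvUnionAll p.2)))).insert k
        (PySem.Set.union ((PySem.Dict.mk (dg.items.map (fun p => (p.1, pvUnionAll p.2)))).getD k PySem.Set.empty) g)
      = PySem.Dict.mk ((dg.modify k [] (fun ls => ls ++ [g])).items.map (fun p => (p.1, pvUnionAll p.2))) := by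
  have hval : PySem.Set.union ((PySem.Dict.mk (dg.items.map (fun p => (p.1, pvUnionAll p.2)))).getD k PySem.Set.empty) g
      = pvUnionAll (dg.getD k [] ++ [g]) := by
    rw [PySem.Dict.getD_eq_get?_getD, get?_map_pvUnionAll]
    cases h : (PySem.Dict.mk dg.items : PySem.Dict String (List (List Int))).get? k with
    | none =>
      have : dg.get? k = none := h
      simp [PySem.Dict.getD_eq_get?_getD, this, pvUnionAll, PySem.Set.union, PySem.Set.update]
    | some v =>
      have : dg.get? k = some v := h
      simp [PySem.Dict.getD_eq_get?_getD, this, pvUnionAll, PySem.Set.union, PySem.Set.update,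
        List.foldl_append]
  rw [hval]
  -- now both sides are inserts; compare items via the contains case split
  show PySem.Dict.insert _ k _ = _
  simp only [PySem.Dict.modify, PySem.Dict.insert, contains_map_pvUnionAll dg.items k]
  by_cases h : (PySem.Dict.mk dg.items : PySem.Dict String (List (List Int))).contains k
  · have h' : dg.contains k = true := h
    simp only [h', if_true]
    congr 1
    rw [List.map_map, List.map_map]
    apply List.map_congr_left
    intro p _
    by_cases hp : p.1 == k <;> simp [hp, Function.comp]
  · have h' : dg.contains k = false := eq_false_of_ne_true h
    simp [h']

-- the loop invariant: A's dict is B's group dict mapped through pvUnionAll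
theorem fold_invariant (l : List (String × List Int)) :
    ∀ (dg : PySem.Dict String (List (List Int))),
      l.foldl (fun d p => d.insert p.1 (PySem.Set.union (d.getD p.1 PySem.Set.empty) p.2))
          (PySem.Dict.mk (dg.items.map (fun p => (p.1, pvUnionAll p.2))))
        = PySem.Dict.mk ((l.foldl (fun d p => d.modify p.1 [] (fun ls => ls ++ [p.2])) dg).items.map
            (fun p => (p.1, pvUnionAll p.2))) := by
  induction l with
  | nil => intro dg; rfl
  | cons p l ih =>
    intro dg
    simp only [List.foldl_cons]
    rw [step_commute dg p.1 p.2]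
    exact ih _

-- ===== VERDICT (by name: the statement is the Claim_ definition above) =====
theorem get_stops_with_gossips_py_spec : Claim_equal_get_stops_with_gossips_py := by
  intro bus_stops bus_drivers _ hpre
  unfold Spec_get_stops_with_gossips_py get_stops_with_gossips_py get_stops_with_gossips_py_alt
  rw [PySem.List.pyRange_zero_nat, List.foldl_map]
  simp only [PySem.List.pyGetD_natCast]
  rw [foldl_range_zip (fun d name g =>
        let d1 := if d.contains name then d else d.insert name PySem.Set.empty
        d1.insert name (PySem.Set.union (d1.getD name PySem.Set.empty) g))
      bus_stops bus_drivers PySem.Dict.empty hpre]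
  have hstep : (fun (d : PySem.Dict String (List Int)) (p : String × List Int) =>
      (let d1 := if d.contains p.1 then d else d.insert p.1 PySem.Set.empty
       d1.insert p.1 (PySem.Set.union (d1.getD p.1 PySem.Set.empty) p.2)))
      = (fun d p => d.insert p.1 (PySem.Set.union (d.getD p.1 PySem.Set.empty) p.2)) := by
    funext d p; exact stepA_eq d p.1 p.2
  rw [hstep]
  have := fold_invariant (bus_stops.zip bus_drivers) PySem.Dict.empty
  simp only [PySem.Dict.empty, List.map_nil] at this ⊢
  rw [this]
  rfl
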